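-- pv_equiv track=rewrite | github.com/michal-slezak-dev/matury-informatyka | nowa_formuła/2021/czerwiec/zadanie4_3_vol2.py | transform_into_palindrome
-- ===== SOURCE A (Python) =====
-- from collections import deque
-- from copy import deepcopy
--
-- def is_palindrome(string):
--     if string == string[::-1]:
--         return True
--     return False
--
-- def transform_into_palindrome(string, chars):
--     """
--     Funkcja ta zwraca zmieniony w palindrom napis, jeśli się da
--     :param string:
--     :param chars:
--     :return:
--     """
--     string = deque(string)
--
--     for char in chars:
--
--         deque_left = deepcopy(string)
--         deque_right = deepcopy(string)
--
--         deque_left.appendleft(char)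
--         deque_right.append(char)
--
--         string_left = "".join(list(deque_left))
--         string_right = "".join(list(deque_right))
--
--         if is_palindrome(string_left):
--             return string_left
--
--         elif is_palindrome(string_right):
--             return string_right
--
--         elif not is_palindrome(string_left):
--             deque_left.popleft()
--
--         elif not is_palindrome(string_right):
--             deque_right.pop()
-- ===== SOURCE B (Python) =====
-- def transform_into_palindrome(string, chars):
--     """Same result as A, but O(n+m): palindrome-ness of string[:-1] and string[1:]
--     is computed once; each candidate char then needs only an endpoint comparison."""
--     pal_drop_last = string[:-1] == string[:-1][::-1]
--     pal_drop_first = string[1:] == string[1:][::-1]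
--     for char in chars:
--         if not string or (string[-1] == char and pal_drop_last):
--             return char + string
--         if string[0] == char and pal_drop_first:
--             return string + char
--     return None
-- ===== Notes on version B (the rewrite author's own statement) =====
-- stated objective: faster
-- what changed: B precomputes palindrome-ness of string[:-1] and string[1:] once and tests each candidate char by a single endpoint comparison, instead of A's per-char deque copies and full palindrome checks.
import Mathlib
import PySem

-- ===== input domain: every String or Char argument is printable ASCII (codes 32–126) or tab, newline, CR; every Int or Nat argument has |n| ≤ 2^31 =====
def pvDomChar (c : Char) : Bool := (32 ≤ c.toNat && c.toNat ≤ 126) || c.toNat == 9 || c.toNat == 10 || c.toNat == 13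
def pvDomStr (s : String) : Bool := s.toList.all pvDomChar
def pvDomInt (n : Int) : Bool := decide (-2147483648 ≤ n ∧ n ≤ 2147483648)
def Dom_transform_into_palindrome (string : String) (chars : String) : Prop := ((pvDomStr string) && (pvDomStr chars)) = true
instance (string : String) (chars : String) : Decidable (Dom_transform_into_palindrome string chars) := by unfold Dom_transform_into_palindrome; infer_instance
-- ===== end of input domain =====

-- B replaces A's per-char deque copies and full palindrome tests by two precomputed
-- palindrome flags plus an O(1) endpoint comparison per candidate char (objective: faster).

-- ===== PORT A =====
-- is_palindrome(s): s == s[::-1] (s[::-1] is list reversal on the characters)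
def pvIsPalindrome (s : List Char) : Bool :=
  if s = s.reverse then true else false

-- the for-loop over chars; `l` is the (never actually mutated) deque contents.
-- The two trailing `elif not is_palindrome(...)` branches only pop from the throwaway
-- copies, so they leave the loop state unchanged: the loop simply continues.
def pvALoop (l : List Char) : List Char → Option String
  | [] => none
  | c :: rest =>
    let left := c :: l
    let right := l ++ [c]
    if pvIsPalindrome left then some (String.ofList left)
    else if pvIsPalindrome right then some (String.ofList right)
    else pvALoop l rest

def transform_into_palindrome (string : String) (chars : String) : Option String :=
  pvALoop string.toList chars.toList

-- ===== PORT B =====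
-- Source B's loop with the two precomputed flags pl = is_pal(string[:-1]), pr = is_pal(string[1:])
def pvBLoop (l : List Char) (pl pr : Bool) : List Char → Option String
  | [] => none
  | c :: rest =>
    if l.isEmpty || (l.getLast? == some c && pl) then some (String.ofList (c :: l))
    else if l.head? == some c && pr then some (String.ofList (l ++ [c]))
    else pvBLoop l pl pr rest

def transform_into_palindrome_alt (string : String) (chars : String) : Option String :=
  let l := string.toList
  -- string[:-1] = l.dropLast, string[1:] = l.drop 1, s[::-1] = reversal
  pvBLoop l (l.dropLast == l.dropLast.reverse) ((l.drop 1) == (l.drop 1).reverse) chars.toList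

-- ===== PRECONDITION & SPEC =====
def Spec_transform_into_palindrome (string : String) (chars : String) (out : Option String) : Prop := out = transform_into_palindrome_alt string chars
instance (string : String) (chars : String) (out : Option String) : Decidable (Spec_transform_into_palindrome string chars out) := by unfold Spec_transform_into_palindrome; infer_instance

-- ===== CLAIM (what is proved, stated in full; the proofs are below) =====
def Claim_equal_transform_into_palindrome : Prop := ∀ (string : String) (chars : String), Dom_transform_into_palindrome string chars → Spec_transform_into_palindrome string chars (transform_into_palindrome string chars)

-- ===== LEMMAS AND PROOFS =====

-- adding a char at one end of a nonempty list gives a palindrome iff the outer chars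
-- match and the inner part is a palindrome
theorem pvKey (c d : Char) (m : List Char) :
    (c :: (m ++ [d]) = (c :: (m ++ [d])).reverse) ↔ (c = d ∧ m = m.reverse) := by
  rw [List.reverse_cons, List.reverse_append, List.reverse_singleton, List.singleton_append]
  simp only [List.cons_append, List.cons.injEq]
  constructor
  · rintro ⟨h1, h2⟩
    subst h1
    exact ⟨rfl, List.append_cancel_right h2⟩
  · rintro ⟨h1, h2⟩
    subst h1
    exact ⟨rfl, by rw [← h2]⟩

-- A's left test, phrased as B's endpoint test
theorem pal_cons (c : Char) (l : List Char) :
    pvIsPalindrome (c :: l)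
      = (l.isEmpty || (l.getLast? == some c && (l.dropLast == l.dropLast.reverse))) := by
  rcases List.eq_nil_or_concat l with rfl | ⟨m, d, rfl⟩
  · simp [pvIsPalindrome]
  · simp only [List.concat_eq_append, pvIsPalindrome, pvKey]
    have hE : (m ++ [d]).isEmpty = false := by cases m <;> rfl
    rw [List.getLast?_concat, List.dropLast_concat, hE, Bool.false_or]
    by_cases h1 : c = d
    · subst h1
      by_cases h2 : m = m.reverse
      · rw [if_pos ⟨rfl, h2⟩, beq_iff_eq.mpr h2, beq_self_eq_true, Bool.true_and]
      · rw [if_neg (fun h => h2 h.2), beq_eq_false_iff_ne.mpr h2, Bool.and_false]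
    · rw [if_neg (fun h => h1 h.1),
        beq_eq_false_iff_ne.mpr (fun h => h1 (Option.some_inj.mp h).symm), Bool.false_and]

-- A's right test, phrased as B's endpoint test
theorem pal_concat (c : Char) (l : List Char) :
    pvIsPalindrome (l ++ [c])
      = (l.isEmpty || (l.head? == some c && ((l.drop 1) == (l.drop 1).reverse))) := by
  cases l with
  | nil => simp [pvIsPalindrome]
  | cons d m =>
    simp only [List.cons_append, pvIsPalindrome, pvKey, List.isEmpty_cons,
      List.head?_cons, List.drop_succ_cons, List.drop_zero, Bool.false_or]
    by_cases h1 : d = c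
    · subst h1
      by_cases h2 : m = m.reverse
      · rw [if_pos ⟨rfl, h2⟩, beq_iff_eq.mpr h2, beq_self_eq_true, Bool.true_and]
      · rw [if_neg (fun h => h2 h.2), beq_eq_false_iff_ne.mpr h2, Bool.and_false]
    · rw [if_neg (fun h => h1 h.1),
        beq_eq_false_iff_ne.mpr (fun h => h1 (Option.some_inj.mp h)), Bool.false_and]

theorem loops_eq (l : List Char) (cs : List Char) :
    pvALoop l cs = pvBLoop l (l.dropLast == l.dropLast.reverse) ((l.drop 1) == (l.drop 1).reverse) cs := by
  induction cs with
  | nil => rfl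
  | cons c rest ih =>
    cases hE : l.isEmpty with
    | true => simp [pvALoop, pvBLoop, pal_cons, hE]
    | false => simp [pvALoop, pvBLoop, pal_cons, pal_concat, hE, ih]

-- ===== VERDICT (by name: the statement is the Claim_ definition above) =====
theorem transform_into_palindrome_spec : Claim_equal_transform_into_palindrome := by
  intro string chars _
  unfold Spec_transform_into_palindrome transform_into_palindrome transform_into_palindrome_alt
  exact loops_eq string.toList chars.toList
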